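-- pv_equiv track=rewrite | github.com/jiyeonlee-milliondreams/TIL | Algorithm/SWEA_exercise/IM_0214/kdjhlhf.py | solution
-- ===== SOURCE A (Python) =====
-- def solution(numbers, hand):
--     answer = ''
--     # 왼쪽 아래가 0,0
--     left = [0, 0]
--     right = [2, 0]
--     for i in numbers:
--         if i == 1:
--             answer += 'L'
--             left = [0, 3]
--         elif i == 4:
--             answer += 'L'
--             left = [0, 2]
--         elif i == 7:
--             answer += 'L'
--             left = [0, 1]
--         elif i == 3:
--             answer += 'R'
--             right = [2, 3]
--         elif i == 6:
--             answer += 'R'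
--             right = [2, 2]
--         elif i == 9:
--             answer += 'R'
--             right = [2, 1]
--         elif i == 2:
--             distance1 = abs(1 - left[0]) + abs(3 - left[1])
--             distance2 = abs(1 - right[0]) + abs(3 - right[1])
--             if distance1 < distance2:
--                 left = [1, 3]
--                 answer += 'L'
--             elif distance2 < distance1:
--                 right = [1, 3]
--                 answer += 'R'
--             else:
--                 if hand == "right":
--                     right = [1, 3]
--                     answer += 'R'
--                 else:
--                     left = [1, 3]
--                     answer += 'L'
--
--         elif i == 5:
--             distance1 = abs(1 - left[0]) + abs(2 - left[1])
--             distance2 = abs(1 - right[0]) + abs(2 - right[1])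
--             if distance1 < distance2:
--                 left = [1, 2]
--                 answer += 'L'
--             elif distance2 < distance1:
--                 right = [1, 2]
--                 answer += 'R'
--             else:
--                 if hand == "right":
--                     right = [1, 2]
--                     answer += 'R'
--                 else:
--                     left = [1, 2]
--                     answer += 'L'
--         elif i == 8:
--             distance1 = abs(1 - left[0]) + abs(1 - left[1])
--             distance2 = abs(1 - right[0]) + abs(1 - right[1])
--             if distance1 < distance2:
--                 left = [1, 1]
--                 answer += 'L'
--             elif distance2 < distance1:
--                 right = [1, 1]
--                 answer += 'R'
--             else:
--                 if hand == "right":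
--                     right = [1, 1]
--                     answer += 'R'
--                 else:
--                     left = [1, 1]
--                     answer += 'L'
--         elif i == 0:
--             distance1 = abs(1 - left[0]) + abs(0 - left[1])
--             distance2 = abs(1 - right[0]) + abs(0 - right[1])
--             if distance1 < distance2:
--                 left = [1, 0]
--                 answer += 'L'
--             elif distance2 < distance1:
--                 right = [1, 0]
--                 answer += 'R'
--             else:
--                 if hand == "right":
--                     right = [1, 0]
--                     answer += 'R'
--                 else:
--                     left = [1, 0]
--                     answer += 'L'
--
--     return answer
-- ===== SOURCE B (Python) =====
-- def solution(numbers, hand):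
--     # Finite-state machine: precompute the complete transition table over all
--     # (left-thumb key, right-thumb key, digit) states once; the scan over
--     # numbers is then a single table lookup per element, with no per-step
--     # geometry or branching on the digit.
--     pos = {1: (0, 3), 2: (1, 3), 3: (2, 3), 4: (0, 2), 5: (1, 2), 6: (2, 2),
--            7: (0, 1), 8: (1, 1), 9: (2, 1), 0: (1, 0), 10: (0, 0), 11: (2, 0)}
--     prefer_left = hand != "right"
--     lefts = [10, 1, 4, 7, 2, 5, 8, 0]    # keys the left thumb can rest on (10 = its start)
--     rights = [11, 3, 6, 9, 2, 5, 8, 0]   # keys the right thumb can rest on (11 = its start)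
--     keys = [(l, r, d) for l in lefts for r in rights for d in range(10)]
--     table = {}
--     for (l, r, d) in keys:
--         x, y = pos[d]
--         if x == 0:
--             table[(l, r, d)] = ('L', d, r)
--         elif x == 2:
--             table[(l, r, d)] = ('R', l, d)
--         else:
--             lx, ly = pos[l]
--             rx, ry = pos[r]
--             dl = abs(x - lx) + abs(y - ly)
--             dr = abs(x - rx) + abs(y - ry)
--             if dl < dr or (dl == dr and prefer_left):
--                 table[(l, r, d)] = ('L', d, r)
--             else:
--                 table[(l, r, d)] = ('R', l, d)
--     answer = ''
--     l, r = 10, 11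
--     for n in numbers:
--         t = table.get((l, r, n))
--         if t is None:
--             continue
--         ch, l, r = t
--         answer += ch
--     return answer
-- ===== Notes on version B (the rewrite author's own statement) =====
-- stated objective: alternative
-- what changed: B compiles the keypad rules into an explicit finite-state machine: a 640-entry transition table over (left-thumb key, right-thumb key, digit) is precomputed once, and the pass over numbers is then a pure table lookup per element, whereas A recomputes distances and walks a 12-branch if/elif chain at every step.
import Mathlib
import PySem

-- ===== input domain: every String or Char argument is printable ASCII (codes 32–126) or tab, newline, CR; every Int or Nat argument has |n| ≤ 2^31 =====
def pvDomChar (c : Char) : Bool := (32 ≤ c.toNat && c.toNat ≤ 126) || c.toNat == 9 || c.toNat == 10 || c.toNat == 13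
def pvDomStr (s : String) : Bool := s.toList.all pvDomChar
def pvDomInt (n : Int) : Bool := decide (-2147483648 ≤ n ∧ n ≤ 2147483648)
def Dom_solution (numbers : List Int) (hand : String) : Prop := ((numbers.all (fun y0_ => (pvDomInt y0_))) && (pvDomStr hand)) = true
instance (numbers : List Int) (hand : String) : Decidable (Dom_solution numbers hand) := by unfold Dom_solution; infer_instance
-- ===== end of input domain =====

-- B compiles the keypad rules into a precomputed finite-state transition table, so the scan
-- over numbers is one table lookup per element instead of A's 12-branch distance chain;
-- objective: alternative.

-- ===== PORT A =====
-- one iteration of A's for-loop: state = (answer, left, right)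
def stepA (hand : String) (s : String × (Int × Int) × (Int × Int)) (i : Int) :
    String × (Int × Int) × (Int × Int) :=
  let (answer, left, right) := s
  if i = 1 then (answer ++ "L", (0, 3), right)
  else if i = 4 then (answer ++ "L", (0, 2), right)
  else if i = 7 then (answer ++ "L", (0, 1), right)
  else if i = 3 then (answer ++ "R", left, (2, 3))
  else if i = 6 then (answer ++ "R", left, (2, 2))
  else if i = 9 then (answer ++ "R", left, (2, 1))
  else if i = 2 then
    let d1 := |1 - left.1| + |3 - left.2|
    let d2 := |1 - right.1| + |3 - right.2|
    if d1 < d2 then (answer ++ "L", (1, 3), right)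
    else if d2 < d1 then (answer ++ "R", left, (1, 3))
    else if hand = "right" then (answer ++ "R", left, (1, 3))
    else (answer ++ "L", (1, 3), right)
  else if i = 5 then
    let d1 := |1 - left.1| + |2 - left.2|
    let d2 := |1 - right.1| + |2 - right.2|
    if d1 < d2 then (answer ++ "L", (1, 2), right)
    else if d2 < d1 then (answer ++ "R", left, (1, 2))
    else if hand = "right" then (answer ++ "R", left, (1, 2))
    else (answer ++ "L", (1, 2), right)
  else if i = 8 then
    let d1 := |1 - left.1| + |1 - left.2|
    let d2 := |1 - right.1| + |1 - right.2|
    if d1 < d2 then (answer ++ "L", (1, 1), right)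
    else if d2 < d1 then (answer ++ "R", left, (1, 1))
    else if hand = "right" then (answer ++ "R", left, (1, 1))
    else (answer ++ "L", (1, 1), right)
  else if i = 0 then
    let d1 := |1 - left.1| + |0 - left.2|
    let d2 := |1 - right.1| + |0 - right.2|
    if d1 < d2 then (answer ++ "L", (1, 0), right)
    else if d2 < d1 then (answer ++ "R", left, (1, 0))
    else if hand = "right" then (answer ++ "R", left, (1, 0))
    else (answer ++ "L", (1, 0), right)
  else s

def solution (numbers : List Int) (hand : String) : String :=
  (numbers.foldl (stepA hand) ("", (0, 0), (2, 0))).1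

-- ===== PORT B =====
-- pos: key number -> coordinate (10/11 are the thumbs' start keys)
def posB : PySem.Dict Int (Int × Int) :=
  PySem.Dict.ofList [(1, (0, 3)), (2, (1, 3)), (3, (2, 3)), (4, (0, 2)), (5, (1, 2)),
                     (6, (2, 2)), (7, (0, 1)), (8, (1, 1)), (9, (2, 1)), (0, (1, 0)),
                     (10, (0, 0)), (11, (2, 0))]

def leftsB : List Int := [10, 1, 4, 7, 2, 5, 8, 0]
def rightsB : List Int := [11, 3, 6, 9, 2, 5, 8, 0]

-- the comprehension [(l, r, d) for l in lefts for r in rights for d in range(10)]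
def keysB : List (Int × Int × Int) :=
  leftsB.flatMap (fun l => rightsB.flatMap (fun r =>
    (PySem.List.pyRange 0 10 1).map (fun d => (l, r, d))))

-- the body of B's table-building loop for one key (pos[…] always hits on keysB, so the
-- getD default (0,0) is unreachable there; getD ports the dict lookup exactly on those keys)
def entryB (preferLeft : Bool) (k : Int × Int × Int) : String × Int × Int :=
  let l := k.1
  let r := k.2.1
  let d := k.2.2
  let c := posB.getD d (0, 0)
  if c.1 = 0 then ("L", d, r)
  else if c.1 = 2 then ("R", l, d)
  else
    let lp := posB.getD l (0, 0)
    let rp := posB.getD r (0, 0)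
    let dl := |c.1 - lp.1| + |c.2 - lp.2|
    let dr := |c.1 - rp.1| + |c.2 - rp.2|
    if dl < dr ∨ (dl = dr ∧ preferLeft = true) then ("L", d, r) else ("R", l, d)

def tableB (preferLeft : Bool) : PySem.Dict (Int × Int × Int) (String × Int × Int) :=
  keysB.foldl (fun t k => t.insert k (entryB preferLeft k)) PySem.Dict.empty

-- one iteration of B's scan: state = (answer, left key, right key)
def stepB (table : PySem.Dict (Int × Int × Int) (String × Int × Int))
    (s : String × Int × Int) (n : Int) : String × Int × Int :=
  match table.get? (s.2.1, s.2.2, n) with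
  | none => s
  | some (ch, l', r') => (s.1 ++ ch, l', r')

def solution_alt (numbers : List Int) (hand : String) : String :=
  let preferLeft := hand != "right"
  let table := tableB preferLeft
  (numbers.foldl (stepB table) ("", 10, 11)).1

-- ===== PRECONDITION & SPEC =====
def Spec_solution (numbers : List Int) (hand : String) (out : String) : Prop := out = solution_alt numbers hand
instance (numbers : List Int) (hand : String) (out : String) : Decidable (Spec_solution numbers hand out) := by unfold Spec_solution; infer_instance

-- ===== CLAIM (what is proved, stated in full; the proofs are below) =====
def Claim_equal_solution : Prop := ∀ (numbers : List Int) (hand : String), Dom_solution numbers hand → Spec_solution numbers hand (solution numbers hand)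

-- ===== LEMMAS AND PROOFS =====

-- coordinate of a key, and the embedding of B's key-state into A's coordinate-state
def posv (k : Int) : Int × Int := posB.getD k (0, 0)

def mapSt (s : String × Int × Int) : String × (Int × Int) × (Int × Int) :=
  (s.1, posv s.2.1, posv s.2.2)

-- a fold of inserts whose value is a function of the key: lookup = membership
lemma get?_foldl_insert_fn {K V : Type} [BEq K] [LawfulBEq K] [DecidableEq K]
    (ks : List K) (f : K → V) (d0 : PySem.Dict K V) (k : K) :
    (ks.foldl (fun t x => t.insert x (f x)) d0).get? k
      = if k ∈ ks then some (f k) else d0.get? k := by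
  induction ks generalizing d0 with
  | nil => simp
  | cons x xs ih =>
    simp only [List.foldl_cons, ih, List.mem_cons]
    by_cases hx : k ∈ xs
    · simp [hx]
    · by_cases hkx : k = x
      · subst hkx; simp [hx]
      · simp [hx, hkx, PySem.Dict.get?_insert]

lemma mem_keysB (l r d : Int) :
    (l, r, d) ∈ keysB ↔ l ∈ leftsB ∧ r ∈ rightsB ∧ d ∈ PySem.List.pyRange 0 10 1 := by
  simp only [keysB, List.mem_flatMap, List.mem_map, Prod.mk.injEq]
  constructor
  · rintro ⟨a, ha, b, hb, e, he, rfl, rfl, rfl⟩; exact ⟨ha, hb, he⟩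
  · rintro ⟨ha, hb, he⟩; exact ⟨l, ha, r, hb, d, he, rfl, rfl, rfl⟩

lemma table_get (pl : Bool) (l r d : Int) :
    (tableB pl).get? (l, r, d)
      = if l ∈ leftsB ∧ r ∈ rightsB ∧ d ∈ PySem.List.pyRange 0 10 1
        then some (entryB pl (l, r, d)) else none := by
  rw [tableB, get?_foldl_insert_fn]
  simp only [mem_keysB, PySem.Dict.get?_empty]

-- one step: A on the embedded state equals the embedding of B's step, and B's keys stay legal
lemma step_eq (hand : String) (ans : String) (lk rk n : Int)
    (hl : lk ∈ leftsB) (hr : rk ∈ rightsB) :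
    stepA hand (mapSt (ans, lk, rk)) n
        = mapSt (stepB (tableB (hand != "right")) (ans, lk, rk) n)
      ∧ (stepB (tableB (hand != "right")) (ans, lk, rk) n).2.1 ∈ leftsB
      ∧ (stepB (tableB (hand != "right")) (ans, lk, rk) n).2.2 ∈ rightsB := by
  by_cases h1 : n = 1
  · subst h1
    simp [stepA, stepB, table_get, hl, hr, mapSt, posv, entryB,
          show posB.getD (1:Int) (0,0) = (0,3) from by decide,
          show ((1:Int) ∈ PySem.List.pyRange 0 10 1) from by decide,
          show ((1:Int) ∈ leftsB) from by decide]
  by_cases h4 : n = 4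
  · subst h4
    simp [stepA, stepB, table_get, hl, hr, mapSt, posv, entryB,
          show posB.getD (4:Int) (0,0) = (0,2) from by decide,
          show ((4:Int) ∈ PySem.List.pyRange 0 10 1) from by decide,
          show ((4:Int) ∈ leftsB) from by decide]
  by_cases h7 : n = 7
  · subst h7
    simp [stepA, stepB, table_get, hl, hr, mapSt, posv, entryB,
          show posB.getD (7:Int) (0,0) = (0,1) from by decide,
          show ((7:Int) ∈ PySem.List.pyRange 0 10 1) from by decide,
          show ((7:Int) ∈ leftsB) from by decide]
  by_cases h3 : n = 3
  · subst h3
    simp [stepA, stepB, table_get, hl, hr, mapSt, posv, entryB,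
          show posB.getD (3:Int) (0,0) = (2,3) from by decide,
          show ((3:Int) ∈ PySem.List.pyRange 0 10 1) from by decide,
          show ((3:Int) ∈ rightsB) from by decide]
  by_cases h6 : n = 6
  · subst h6
    simp [stepA, stepB, table_get, hl, hr, mapSt, posv, entryB,
          show posB.getD (6:Int) (0,0) = (2,2) from by decide,
          show ((6:Int) ∈ PySem.List.pyRange 0 10 1) from by decide,
          show ((6:Int) ∈ rightsB) from by decide]
  by_cases h9 : n = 9
  · subst h9
    simp [stepA, stepB, table_get, hl, hr, mapSt, posv, entryB,
          show posB.getD (9:Int) (0,0) = (2,1) from by decide,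
          show ((9:Int) ∈ PySem.List.pyRange 0 10 1) from by decide,
          show ((9:Int) ∈ rightsB) from by decide]
  by_cases h2 : n = 2
  · subst h2
    simp only [stepB, table_get, hl, hr, mapSt, posv, entryB,
          show ((2:Int) ∈ PySem.List.pyRange 0 10 1) from by decide,
          show posB.getD (2:Int) (0,0) = (1,3) from by decide,
          and_self, if_true, bne_iff_ne, ne_eq]
    simp only [stepA, show ((1:Int) = 0) = False from by norm_num,
          show ((1:Int) = 2) = False from by norm_num, if_false,
          show ((2:Int) = 1) = False from by norm_num, show ((2:Int) = 4) = False from by norm_num, show ((2:Int) = 7) = False from by norm_num, show ((2:Int) = 3) = False from by norm_num, show ((2:Int) = 6) = False from by norm_num, show ((2:Int) = 9) = False from by norm_num,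
          if_true]
    generalize |1 - (posB.getD lk (0, 0)).1| + |3 - (posB.getD lk (0, 0)).2| = D1
    generalize |1 - (posB.getD rk (0, 0)).1| + |3 - (posB.getD rk (0, 0)).2| = D2
    by_cases hh : hand = "right" <;> simp only [hh, not_true, not_false_iff, and_true, and_false, or_false] <;>
      split_ifs <;>
      first
        | (refine ⟨rfl, ?_, ?_⟩ <;> first | assumption | simp [leftsB, rightsB])
        | (exfalso; omega)
  by_cases h5 : n = 5
  · subst h5
    simp only [stepB, table_get, hl, hr, mapSt, posv, entryB,
          show ((5:Int) ∈ PySem.List.pyRange 0 10 1) from by decide,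
          show posB.getD (5:Int) (0,0) = (1,2) from by decide,
          and_self, if_true, bne_iff_ne, ne_eq]
    simp only [stepA, show ((1:Int) = 0) = False from by norm_num,
          show ((1:Int) = 2) = False from by norm_num, if_false,
          show ((5:Int) = 1) = False from by norm_num, show ((5:Int) = 4) = False from by norm_num, show ((5:Int) = 7) = False from by norm_num, show ((5:Int) = 3) = False from by norm_num, show ((5:Int) = 6) = False from by norm_num, show ((5:Int) = 9) = False from by norm_num, show ((5:Int) = 2) = False from by norm_num,
          if_true]
    generalize |1 - (posB.getD lk (0, 0)).1| + |2 - (posB.getD lk (0, 0)).2| = D1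
    generalize |1 - (posB.getD rk (0, 0)).1| + |2 - (posB.getD rk (0, 0)).2| = D2
    by_cases hh : hand = "right" <;> simp only [hh, not_true, not_false_iff, and_true, and_false, or_false] <;>
      split_ifs <;>
      first
        | (refine ⟨rfl, ?_, ?_⟩ <;> first | assumption | simp [leftsB, rightsB])
        | (exfalso; omega)
  by_cases h8 : n = 8
  · subst h8
    simp only [stepB, table_get, hl, hr, mapSt, posv, entryB,
          show ((8:Int) ∈ PySem.List.pyRange 0 10 1) from by decide,
          show posB.getD (8:Int) (0,0) = (1,1) from by decide,
          and_self, if_true, bne_iff_ne, ne_eq]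
    simp only [stepA, show ((1:Int) = 0) = False from by norm_num,
          show ((1:Int) = 2) = False from by norm_num, if_false,
          show ((8:Int) = 1) = False from by norm_num, show ((8:Int) = 4) = False from by norm_num, show ((8:Int) = 7) = False from by norm_num, show ((8:Int) = 3) = False from by norm_num, show ((8:Int) = 6) = False from by norm_num, show ((8:Int) = 9) = False from by norm_num, show ((8:Int) = 2) = False from by norm_num, show ((8:Int) = 5) = False from by norm_num,
          if_true]
    generalize |1 - (posB.getD lk (0, 0)).1| + |1 - (posB.getD lk (0, 0)).2| = D1
    generalize |1 - (posB.getD rk (0, 0)).1| + |1 - (posB.getD rk (0, 0)).2| = D2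
    by_cases hh : hand = "right" <;> simp only [hh, not_true, not_false_iff, and_true, and_false, or_false] <;>
      split_ifs <;>
      first
        | (refine ⟨rfl, ?_, ?_⟩ <;> first | assumption | simp [leftsB, rightsB])
        | (exfalso; omega)
  by_cases h0 : n = 0
  · subst h0
    simp only [stepB, table_get, hl, hr, mapSt, posv, entryB,
          show ((0:Int) ∈ PySem.List.pyRange 0 10 1) from by decide,
          show posB.getD (0:Int) (0,0) = (1,0) from by decide,
          and_self, if_true, bne_iff_ne, ne_eq]
    simp only [stepA, show ((1:Int) = 0) = False from by norm_num,
          show ((1:Int) = 2) = False from by norm_num, if_false,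
          show ((0:Int) = 1) = False from by norm_num, show ((0:Int) = 4) = False from by norm_num, show ((0:Int) = 7) = False from by norm_num, show ((0:Int) = 3) = False from by norm_num, show ((0:Int) = 6) = False from by norm_num, show ((0:Int) = 9) = False from by norm_num, show ((0:Int) = 2) = False from by norm_num, show ((0:Int) = 5) = False from by norm_num, show ((0:Int) = 8) = False from by norm_num,
          if_true]
    generalize |1 - (posB.getD lk (0, 0)).1| + |0 - (posB.getD lk (0, 0)).2| = D1
    generalize |1 - (posB.getD rk (0, 0)).1| + |0 - (posB.getD rk (0, 0)).2| = D2
    by_cases hh : hand = "right" <;> simp only [hh, not_true, not_false_iff, and_true, and_false, or_false] <;>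
      split_ifs <;>
      first
        | (refine ⟨rfl, ?_, ?_⟩ <;> first | assumption | simp [leftsB, rightsB])
        | (exfalso; omega)
  have hmem : ¬ ((n:Int) ∈ PySem.List.pyRange 0 10 1) := by
    rw [PySem.List.mem_pyRange_one]
    omega
  simp [stepA, stepB, table_get, hmem, h1, h2, h3, h4, h5, h6, h7, h8, h9, h0, mapSt]
  exact ⟨hl, hr⟩

-- the whole fold, by induction with the key-legality invariant
lemma loop_eq (hand : String) (numbers : List Int) :
    ∀ (ans : String) (lk rk : Int), lk ∈ leftsB → rk ∈ rightsB →
      numbers.foldl (stepA hand) (mapSt (ans, lk, rk))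
        = mapSt (numbers.foldl (stepB (tableB (hand != "right"))) (ans, lk, rk)) := by
  induction numbers with
  | nil => intro ans lk rk _ _; rfl
  | cons n ns ih =>
    intro ans lk rk hl hr
    obtain ⟨h1, h2, h3⟩ := step_eq hand ans lk rk n hl hr
    rcases hs : stepB (tableB (hand != "right")) (ans, lk, rk) n with ⟨a', l', r'⟩
    rw [hs] at h1 h2 h3
    simp only [List.foldl_cons, h1, hs]
    exact ih a' l' r' h2 h3

-- ===== VERDICT (by name: the statement is the Claim_ definition above) =====
theorem solution_spec : Claim_equal_solution := by
  intro numbers hand _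
  unfold Spec_solution solution solution_alt
  have h := loop_eq hand numbers "" 10 11 (by decide) (by decide)
  have h0 : mapSt ("", 10, 11) = ("", (0, 0), (2, 0)) := by decide
  rw [h0] at h
  simp only [h, mapSt]
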